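-- pv_equiv track=rewrite | github.com/GabrielMunarriz/Practice-Code-Problems | Hackerrank/Python/String Formatting/SF.py | generate_octal
-- ===== SOURCE A (Python) =====
-- def generate_octal(number, length):
--
--     #Convert Decimal to Octal
--     octal = ""
--     while number != 0:
--         octal = str(number % 8) + octal
--         number //= 8
--
--     #Add Spaces
--     for i in range(length - len(octal)):
--         octal = " " + octal
--
--     return octal
-- ===== SOURCE B (Python) =====
-- def generate_octal(number, length):
--     def digits(n):
--         return "" if n == 0 else digits(n // 8) + str(n % 8)
--     return digits(number).rjust(length)
-- ===== Notes on version B (the rewrite author's own statement) =====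
-- stated objective: faster
-- what changed: Replaces the imperative prepend-while digit loop and the one-space-at-a-time quadratic padding loop with a recursive most-significant-digit-first helper plus a single str.rjust call.
import Mathlib
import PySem

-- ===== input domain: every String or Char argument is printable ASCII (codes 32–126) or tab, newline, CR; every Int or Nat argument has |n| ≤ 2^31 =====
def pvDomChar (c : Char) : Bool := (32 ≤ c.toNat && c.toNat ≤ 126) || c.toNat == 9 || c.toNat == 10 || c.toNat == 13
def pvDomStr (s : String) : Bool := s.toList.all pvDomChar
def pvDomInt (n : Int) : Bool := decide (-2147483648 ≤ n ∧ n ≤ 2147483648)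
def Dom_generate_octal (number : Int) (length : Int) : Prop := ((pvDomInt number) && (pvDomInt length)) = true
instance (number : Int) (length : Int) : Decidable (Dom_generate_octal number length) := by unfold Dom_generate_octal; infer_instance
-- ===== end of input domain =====

-- B replaces the imperative prepend-while loop and the per-character padding loop with a
-- recursive MSD-first digits helper plus a single rjust-style pad (objective: idiomatic).

-- termination helper for both ports (cited in decreasing_by)
theorem pvOct_div_lt (n : Int) (h : 0 < n) : (PySem.Int.floordiv n 8).toNat < n.toNat := by
  rw [PySem.Int.floordiv_eq_ediv_of_pos (by norm_num)]
  omega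

-- ===== PORT A =====
-- while number != 0: octal = str(number % 8) + octal; number //= 8
-- (the 'n < 0' branch only makes the recursion total: Python A diverges there, excluded by Pre_)
def pvOctLoopA (n : Int) (octal : List Char) : List Char :=
  if n = 0 then octal
  else if h : n < 0 then octal
  else pvOctLoopA (PySem.Int.floordiv n 8) (PySem.Int.toChars (PySem.Int.mod n 8) ++ octal)
termination_by n.toNat
decreasing_by exact pvOct_div_lt n (by omega)

def generate_octal (number : Int) (length : Int) : String :=
  let octal := pvOctLoopA number []
  -- for i in range(length - len(octal)): octal = " " + octal
  let padded := (PySem.List.pyRange 0 (length - PySem.Chars.len octal) 1).foldl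
    (fun acc _ => ' ' :: acc) octal
  String.ofList padded

-- ===== PORT B =====
-- digits(n) = "" if n == 0 else digits(n // 8) + str(n % 8)
-- (the n < 0 guard only makes the recursion total: Python B raises RecursionError there)
def pvDigitsB (n : Int) : List Char :=
  if h : 0 < n then pvDigitsB (PySem.Int.floordiv n 8) ++ PySem.Int.toChars (PySem.Int.mod n 8)
  else []
termination_by n.toNat
decreasing_by exact pvOct_div_lt n h

def generate_octal_alt (number : Int) (length : Int) : String :=
  let s := pvDigitsB number
  -- s.rjust(length)
  String.ofList (List.replicate (length - PySem.Chars.len s).toNat ' ' ++ s)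

-- ===== PRECONDITION & SPEC =====
-- Pre_ excludes negative number, on which Python A never terminates (the while loop cannot reach 0).
def Pre_generate_octal (number : Int) (length : Int) : Prop := 0 ≤ number
instance (number : Int) (length : Int) : Decidable (Pre_generate_octal number length) := by unfold Pre_generate_octal; infer_instance
def pvWitness_generate_octal : Int × Int := (195, 6)
def Spec_generate_octal (number : Int) (length : Int) (out : String) : Prop := out = generate_octal_alt number length
instance (number : Int) (length : Int) (out : String) : Decidable (Spec_generate_octal number length out) := by unfold Spec_generate_octal; infer_instance

-- ===== CLAIM (what is proved, stated in full; the proofs are below) =====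
def Claim_equal_generate_octal : Prop := ∀ (number : Int) (length : Int), Dom_generate_octal number length → Pre_generate_octal number length → Spec_generate_octal number length (generate_octal number length)

-- ===== LEMMAS AND PROOFS =====

-- A's while loop accumulates exactly B's digit string in front of its accumulator
theorem pvLoopA_eq_digits (k : Nat) (n : Int) (acc : List Char) (hk : n.toNat ≤ k) (hn : 0 ≤ n) :
    pvOctLoopA n acc = pvDigitsB n ++ acc := by
  induction k generalizing n acc with
  | zero =>
    have hz : n = 0 := by omega
    subst hz
    rw [pvOctLoopA, pvDigitsB]
    simp
  | succ k ih =>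
    by_cases h0 : n = 0
    · subst h0; rw [pvOctLoopA, pvDigitsB]; simp
    · have hpos : 0 < n := by omega
      rw [pvOctLoopA, pvDigitsB]
      have hlt := pvOct_div_lt n hpos
      have hdiv0 : 0 ≤ PySem.Int.floordiv n 8 := by
        rw [PySem.Int.floordiv_eq_ediv_of_pos (by norm_num)]; omega
      simp only [h0, if_false, dif_pos hpos, dif_neg (by omega : ¬ n < 0)]
      rw [ih _ _ (by omega) hdiv0]
      simp

-- the padding for-loop prepends exactly one space per loop iteration
theorem pvPad_foldl (xs : List Int) (s : List Char) :
    xs.foldl (fun acc _ => ' ' :: acc) s = List.replicate xs.length ' ' ++ s := by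
  induction xs generalizing s with
  | nil => simp
  | cons x xs ih =>
    simp only [List.foldl_cons, List.length_cons, ih, List.replicate_succ']
    simp

-- hence it prepends (k).toNat spaces over range(0, k)
theorem pvPad_eq_replicate (k : Int) (s : List Char) :
    (PySem.List.pyRange 0 k 1).foldl (fun acc _ => ' ' :: acc) s =
      List.replicate k.toNat ' ' ++ s := by
  rw [pvPad_foldl, PySem.List.length_pyRange_one]
  norm_num

-- ===== VERDICT (by name: the statement is the Claim_ definition above) =====
theorem generate_octal_spec : Claim_equal_generate_octal := by
  intro number length _ hpre
  unfold Spec_generate_octal generate_octal generate_octal_alt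
  rw [pvLoopA_eq_digits number.toNat number [] (le_refl _) hpre]
  simp only [List.append_nil]
  rw [pvPad_eq_replicate]
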